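-- pv_equiv track=rewrite | github.com/jissssu/Algorithm | 백준/Gold/17140. 이차원 배열과 연산/이차원 배열과 연산.py | operation_C
-- ===== SOURCE A (Python) =====
-- from collections import Counter
--
-- def operation_R(A):
--     max_len = 0
--     new_A = []
--     for row in A:
--         counter = Counter(x for x in row if x != 0)
--         temp = sorted(counter.items(), key=lambda x: (x[1], x[0]))
--         new_row = []
--         for num, cnt in temp:
--             new_row.extend([num, cnt])
--         max_len = max(max_len, len(new_row))
--         new_A.append(new_row)
--
--     # 100개 초과 자르기
--     max_len = min(max_len, 100)
--     for i in range(len(new_A)):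
--         if len(new_A[i]) < max_len:
--             new_A[i].extend([0] * (max_len - len(new_A[i])))
--         else:
--             new_A[i] = new_A[i][:max_len]
--
--     return new_A
--
-- def operation_C(A):
--     # 행렬 크기
--     row_len = len(A)
--     col_len = len(A[0])
--
--     # 열 기준으로 작업 -> 전치 후 R 연산처럼 처리
--     transposed = []
--     for c in range(col_len):
--         col = [A[r][c] for r in range(row_len)]
--         transposed.append(col)
--
--     transposed = operation_R(transposed)
--
--
--     row_len_new = len(transposed[0])
--     col_len_new = len(transposed)
--
--     new_A = [[0]*row_len_new for _ in range(col_len_new)]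
--
--     for r in range(col_len_new):
--         for c in range(row_len_new):
--             new_A[r][c] = transposed[r][c]
--
--     # 다시 전치해서 행렬 형태 맞추기
--     result = [[0]*col_len_new for _ in range(row_len_new)]
--     for r in range(row_len_new):
--         for c in range(col_len_new):
--             result[r][c] = new_A[c][r]
--
--     return result
-- ===== SOURCE B (Python) =====
-- def _rle(vals):
--     # run-length encode a sorted list into (value, count) runs, built back-to-front
--     runs = []
--     for v in reversed(vals):
--         if runs and runs[0][0] == v:
--             runs[0] = (v, runs[0][1] + 1)
--         else:
--             runs = [(v, 1)] + runs
--     return runs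
--
--
-- def operation_C(A):
--     # Compress each column directly (no transposes): sort its nonzero entries,
--     # run-length encode them, then counting-sort the runs by their count --
--     # buckets indexed by count keep the value order, giving (count, value) order
--     # without a comparator sort.  result[i][c] is the i-th item of column c.
--     cols = []
--     max_len = 0
--     for c in range(len(A[0])):
--         vals = sorted(row[c] for row in A if row[c] != 0)
--         runs = _rle(vals)
--         buckets = [[] for _ in range(len(A) + 1)]
--         for v, k in runs:
--             buckets[k] += [v, k]
--         flat = [x for b in buckets for x in b]
--         cols.append(flat)
--         max_len = max(max_len, len(flat))
--     max_len = min(max_len, 100)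
--     return [[col[i] if i < len(col) else 0 for col in cols] for i in range(max_len)]
-- ===== Notes on version B (the rewrite author's own statement) =====
-- stated objective: alternative
-- what changed: B replaces A's transpose/operation_R(Counter + comparator sort by (count,value))/copy/transpose-back pipeline: it compresses each column of A in place by sorting its nonzero entries, run-length-encoding them into (value,count) runs, counting-sorting the runs into buckets indexed by count, and writes element i of compressed column c straight to result[i][c] (capped at 100 rows).
import Mathlib
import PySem

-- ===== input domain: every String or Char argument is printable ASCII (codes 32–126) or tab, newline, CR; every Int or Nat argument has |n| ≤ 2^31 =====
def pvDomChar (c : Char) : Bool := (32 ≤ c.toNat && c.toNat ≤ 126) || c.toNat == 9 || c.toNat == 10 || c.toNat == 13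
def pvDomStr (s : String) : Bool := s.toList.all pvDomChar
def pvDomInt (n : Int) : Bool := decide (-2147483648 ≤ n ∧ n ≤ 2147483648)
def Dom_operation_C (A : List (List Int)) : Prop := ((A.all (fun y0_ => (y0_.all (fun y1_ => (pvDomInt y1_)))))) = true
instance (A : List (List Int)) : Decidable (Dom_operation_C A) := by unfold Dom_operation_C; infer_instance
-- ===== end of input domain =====

-- B drops A's transpose/operation_R/copy/transpose-back pipeline and its comparator sort:
-- each column is compressed directly by sort + run-length-encoding + counting-sort buckets
-- on the count, and element i of compressed column c is written straight to result[i][c].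


-- ===== PORT A =====
-- helper operation_R, transliterated: Counter of the nonzero row entries, sorted by
-- (count, value), flattened to [num, cnt, …]; then pad/truncate every row to min(max_len, 100)
def operation_R_port (A : List (List Int)) : List (List Int) :=
  let st := A.foldl (fun (st : Int × List (List Int)) row =>
      let counter := PySem.Dict.counter (row.filter (fun x => decide (x ≠ 0)))
      let temp := PySem.List.sorted2 counter.items (fun x => x.2) (fun x => x.1)
      let newRow := temp.foldl (fun acc p => acc ++ [p.1, p.2]) []
      (max st.1 (PySem.List.len newRow), st.2 ++ [newRow])) (0, [])
  let maxLen := min st.1 100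
  st.2.map (fun row =>
    if PySem.List.len row < maxLen then row ++ PySem.List.pyRepeat [0] (maxLen - PySem.List.len row)
    else PySem.List.slice row none (some maxLen))

def operation_C (A : List (List Int)) : List (List Int) :=
  let rowLen := PySem.List.len A
  let colLen := PySem.List.len (PySem.List.pyGetD A 0 [])
  let transposed := (PySem.List.pyRange 0 colLen).map (fun c =>
      (PySem.List.pyRange 0 rowLen).map (fun r => PySem.List.pyGetD (PySem.List.pyGetD A r []) c 0))
  let transposed2 := operation_R_port transposed
  let rowLenNew := PySem.List.len (PySem.List.pyGetD transposed2 0 [])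
  let colLenNew := PySem.List.len transposed2
  let newA := (PySem.List.pyRange 0 colLenNew).map (fun r =>
      (PySem.List.pyRange 0 rowLenNew).map (fun c => PySem.List.pyGetD (PySem.List.pyGetD transposed2 r []) c 0))
  (PySem.List.pyRange 0 rowLenNew).map (fun r =>
      (PySem.List.pyRange 0 colLenNew).map (fun c => PySem.List.pyGetD (PySem.List.pyGetD newA c []) r 0))

-- ===== PORT B =====
-- one step of _rle's loop over reversed(vals): prepend a new run or bump the head run
def pvRLEstep (v : Int) (runs : List (Int × Int)) : List (Int × Int) :=
  match runs with
  | (w, k) :: tl => if w = v then (v, k + 1) :: tl else (v, 1) :: (w, k) :: tl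
  | [] => [(v, 1)]

-- _rle: the loop 'for v in reversed(vals)' building runs front-first is a foldr over vals
def pvRLE_alt (vals : List Int) : List (Int × Int) := vals.foldr pvRLEstep []

def operation_C_alt (A : List (List Int)) : List (List Int) :=
  let st := (PySem.List.pyRange 0 (PySem.List.len (PySem.List.pyGetD A 0 []))).foldl
    (fun (st : List (List Int) × Int) c =>
      let vals := PySem.List.sorted
        ((A.filter (fun row => decide (PySem.List.pyGetD row c 0 ≠ 0))).map
          (fun row => PySem.List.pyGetD row c 0)) (fun x => x) false
      let runs := pvRLE_alt vals
      let buckets0 := (PySem.List.pyRange 0 (PySem.List.len A + 1)).map (fun _ => ([] : List Int))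
      -- buckets[k] += [v, k]: pySetD/pyGetD are exact here — every count k is in 1..len(A)
      let buckets := runs.foldl (fun b p =>
          PySem.List.pySetD b p.2 (PySem.List.pyGetD b p.2 [] ++ [p.1, p.2])) buckets0
      let flat := buckets.flatten
      (st.1 ++ [flat], max st.2 (PySem.List.len flat)))
    ([], (0 : Int))
  let maxLen := min st.2 100
  (PySem.List.pyRange 0 maxLen).map (fun i =>
      st.1.map (fun col => if i < PySem.List.len col then PySem.List.pyGetD col i 0 else 0))

-- ===== PRECONDITION & SPEC =====
-- Pre_ is exactly where Python A returns: A raises IndexError on an empty A (A[0]), on an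
-- empty first row (transposed[0] after compressing zero columns), and on a row shorter than
-- the first row (A[r][c]).
def Pre_operation_C (A : List (List Int)) : Prop :=
  A ≠ [] ∧ A.headI ≠ [] ∧ ∀ row ∈ A, A.headI.length ≤ row.length
instance (A : List (List Int)) : Decidable (Pre_operation_C A) := by unfold Pre_operation_C; infer_instance
def pvWitness_operation_C : List (List Int) := [[1, 2, 1], [0, 2, 2]]

def Spec_operation_C (A : List (List Int)) (out : List (List Int)) : Prop := out = operation_C_alt A
instance (A : List (List Int)) (out : List (List Int)) : Decidable (Spec_operation_C A out) := by unfold Spec_operation_C; infer_instance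

-- ===== CLAIM (what is proved, stated in full; the proofs are below) =====
def Claim_equal_operation_C : Prop := ∀ (A : List (List Int)), Dom_operation_C A → Pre_operation_C A → Spec_operation_C A (operation_C A)

-- ===== LEMMAS AND PROOFS =====

-- the compressed form of one column, as port A computes it
def pvCompress (col : List Int) : List Int :=
  (PySem.List.sorted2 (PySem.Dict.counter (col.filter (fun x => decide (x ≠ 0)))).items
      (fun x => x.2) (fun x => x.1)).foldl (fun acc p => acc ++ [p.1, p.2]) []

-- the compressed columns, the capped maximal length, and the canonical result
def pvCols (A : List (List Int)) : List (List Int) :=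
  List.map (fun c : Nat => pvCompress (A.map (fun row => PySem.List.pyGetD row (c : Int) 0))) (List.range A.headI.length)
def pvM (A : List (List Int)) : Int :=
  min ((pvCols A).foldl (fun m col => max m (col.length : Int)) 0) 100
def pvCanon (A : List (List Int)) : List (List Int) :=
  List.map (fun j : Nat =>
    (pvCols A).map (fun col => if (j : Int) < (col.length : Int) then col.getD j 0 else 0)) (List.range (pvM A).toNat)

lemma pvFoldA (g : Int → List Int) (cs : List Int) (m : Int) (L : List (List Int)) :
    cs.foldl (fun st c => (max st.1 ((g c).length : Int), st.2 ++ [g c])) (m, L)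
    = (cs.foldl (fun m' c => max m' ((g c).length : Int)) m, L ++ cs.map g) := by
  induction cs generalizing m L with
  | nil => simp
  | cons c cs ih => simp only [List.foldl_cons, List.map_cons]; rw [ih]; simp

lemma pvFoldB (g : Int → List Int) (cs : List Int) (m : Int) (L : List (List Int)) :
    cs.foldl (fun st c => (st.1 ++ [g c], max st.2 ((g c).length : Int))) (L, m)
    = (L ++ cs.map g, cs.foldl (fun m' c => max m' ((g c).length : Int)) m) := by
  induction cs generalizing m L with
  | nil => simp
  | cons c cs ih => simp only [List.foldl_cons, List.map_cons]; rw [ih]; simp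

lemma pvM_nonneg (A : List (List Int)) : 0 ≤ pvM A := by
  unfold pvM
  have h := (PySem.List.le_foldl_max_int (pvCols A) (fun col => (col.length : Int)) 0).1
  omega

lemma pvHeadGetD (A : List (List Int)) : PySem.List.pyGetD A 0 [] = A.headI := by
  cases A with
  | nil => rfl
  | cons h t => simp [PySem.List.pyGetD, PySem.List.pyGet?, PySem.List.pyIdx?]

lemma pvRange_cast {β : Type} (n : Int) (h : 0 ≤ n) (f : Int → β) :
    (PySem.List.pyRange 0 n).map f = List.map (fun j : Nat => f (j : Int)) (List.range n.toNat) := by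
  have hn : n = ((n.toNat : Nat) : Int) := by omega
  rw [hn, PySem.List.pyRange_zero_natCast, List.map_map, Int.toNat_natCast]
  rfl

lemma pvMapIdx {α β : Type} (A : List α) (d : α) (f : α → β) :
    List.map (fun j : Nat => f (A.getD j d)) (List.range A.length) = A.map f := by
  apply List.ext_getElem (by simp)
  intro i h1 h2
  simp only [List.getElem_map, List.getElem_range]
  rw [List.getD_eq_getElem A d (by simpa using h2)]

lemma pvInner (A : List (List Int)) (c : Int) :
    (PySem.List.pyRange 0 (A.length : Int)).map
      (fun r => PySem.List.pyGetD (PySem.List.pyGetD A r []) c 0)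
    = A.map (fun row => PySem.List.pyGetD row c 0) := by
  rw [pvRange_cast _ (by positivity)]
  simp only [PySem.List.pyGetD_natCast, Int.toNat_natCast]
  exact pvMapIdx A [] (fun row => PySem.List.pyGetD row c 0)

lemma pvColsEq (A : List (List Int)) :
    (PySem.List.pyRange 0 (A.headI.length : Int)).map
      (fun c => (PySem.List.sorted2
          (PySem.Dict.counter ((A.map (fun row => PySem.List.pyGetD row c 0)).filter
            (fun x => decide (x ≠ 0)))).items (fun kv => kv.2) (fun kv => kv.1)).foldl
          (fun acc p => acc ++ [p.1, p.2]) []) = pvCols A := by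
  rw [pvRange_cast _ (by positivity)]
  simp [pvCols, pvCompress]

lemma pvMaxEq (A : List (List Int)) :
    (List.map
      (fun c => (((PySem.List.sorted2
          (PySem.Dict.counter ((A.map (fun row => PySem.List.pyGetD row c 0)).filter
            (fun x => decide (x ≠ 0)))).items (fun kv => kv.2) (fun kv => kv.1)).foldl
          (fun acc p => acc ++ [p.1, p.2]) []).length : Int))
      (PySem.List.pyRange 0 (A.headI.length : Int))) = (pvCols A).map (fun col => (col.length : Int)) := by
  rw [← pvColsEq, List.map_map]
  rfl

def pvPad (m : Int) (row : List Int) : List Int :=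
  if (row.length : Int) < m then row ++ PySem.List.pyRepeat [0] (m - (row.length : Int))
  else PySem.List.slice row none (some m)

lemma pvPadLen (m : Int) (hm : 0 ≤ m) (row : List Int) : (pvPad m row).length = m.toNat := by
  unfold pvPad
  split_ifs with h
  · rw [List.length_append, PySem.List.pyRepeat_singleton, List.length_replicate]
    omega
  · rw [PySem.List.slice_to _ hm, List.length_take]
    omega

lemma pvPadGet (m : Int) (hm : 0 ≤ m) (row : List Int) (j : Nat) (hj : j < m.toNat) :
    PySem.List.pyGetD (pvPad m row) (j : Int) 0
    = if (j : Int) < (row.length : Int) then row.getD j 0 else 0 := by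
  rw [PySem.List.pyGetD_natCast]
  unfold pvPad
  split_ifs with h1 h2 h3
  · rw [List.getD_eq_getElem _ _ (by rw [List.length_append, PySem.List.pyRepeat_singleton, List.length_replicate]; omega),
      List.getElem_append_left (by omega), ← List.getD_eq_getElem _ 0 (by omega)]
  · rw [List.getD_eq_getElem _ _ (by rw [List.length_append, PySem.List.pyRepeat_singleton, List.length_replicate]; omega),
      List.getElem_append_right (by omega)]
    simp [PySem.List.pyRepeat_singleton]
  · rw [PySem.List.slice_to _ hm, List.getD_eq_getElem _ _ (by simp; omega),
      List.getElem_take, ← List.getD_eq_getElem _ 0 (by omega)]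
  · omega

-- ===== B-side lemmas =====

-- sorted2 with two Int keys is sorted with the lexicographic pair key
lemma pvSorted2Lex {α : Type} (xs : List α) (k1 k2 : α → Int) :
    PySem.List.sorted2 xs k1 k2 false
    = PySem.List.sorted xs (fun x => toLex (k1 x, k2 x)) false := by
  rw [PySem.List.sorted_eq_foldl_insertBy]
  have hb : (fun (a b : α) => decide (k1 a < k1 b) || (!decide (k1 b < k1 a) && decide (k2 a < k2 b)))
      = (fun a b => decide (toLex (k1 a, k2 a) < toLex (k1 b, k2 b))) := by
    funext a b
    by_cases h1 : k1 a < k1 b <;> by_cases h2 : k1 b < k1 a <;> by_cases h3 : k2 a < k2 b <;>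
      simp [h1, h2, h3, Prod.Lex.toLex_lt_toLex] <;> omega
  show xs.foldl (fun acc x => PySem.List.insertBy (fun a b =>
      decide (k1 a < k1 b) || (!decide (k1 b < k1 a) && decide (k2 a < k2 b))) x acc) [] = _
  rw [hb]

lemma pvOfListSublist (l : List Int) : (PySem.Set.ofList l).Sublist l := by
  induction l with
  | nil => simp
  | cons x xs ih =>
    rw [PySem.Set.ofList_cons]
    simp only [PySem.Set.discard]
    exact List.Sublist.cons₂ x (List.filter_sublist.trans ih)

-- the RLE loop on a sorted list yields each distinct value with its count, in first-occurrence order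
lemma pvRunsSpec (l : List Int) (h : l.Pairwise (· ≤ ·)) :
    l.foldr pvRLEstep [] = (PySem.Set.ofList l).map (fun u => (u, (l.count u : Int))) := by
  induction l with
  | nil => rfl
  | cons v rest ih =>
    have hpr : rest.Pairwise (· ≤ ·) := List.Pairwise.of_cons h
    have hv : ∀ x ∈ rest, v ≤ x := (List.pairwise_cons.mp h).1
    rw [List.foldr_cons, ih hpr]
    cases rest with
    | nil => simp [pvRLEstep, PySem.Set.ofList_cons, PySem.Set.discard]
    | cons w tl =>
      rw [PySem.Set.ofList_cons w tl, List.map_cons]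
      by_cases hvw : w = v
      · subst hvw
        simp only [pvRLEstep, if_true]
        rw [PySem.Set.ofList_cons w (w :: tl), PySem.Set.ofList_cons w tl]
        have hd1 : PySem.Set.discard (w :: PySem.Set.discard (PySem.Set.ofList tl) w) w
            = PySem.Set.discard (PySem.Set.ofList tl) w := by
          simp [PySem.Set.discard, List.filter_filter]
        rw [hd1, List.map_cons, List.cons.injEq]
        refine ⟨by simp [List.count_cons_self], ?_⟩
        apply List.map_congr_left
        intro u hu
        have hne : w ≠ u := fun hwu => ((PySem.Set.mem_discard _ _ _).mp hu).2 hwu.symm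
        simp [List.count_cons_of_ne hne]
      · have hvnot : v ∉ (w :: tl) := by
          intro hmem
          rcases List.mem_cons.mp hmem with rfl | htl
          · exact hvw rfl
          · have h1 : w ≤ v := (List.pairwise_cons.mp hpr).1 v htl
            have h2 : v ≤ w := hv w List.mem_cons_self
            exact hvw (le_antisymm h1 h2)
        simp only [pvRLEstep, if_neg hvw]
        rw [PySem.Set.ofList_cons v (w :: tl)]
        have hd2 : PySem.Set.discard (PySem.Set.ofList (w :: tl)) v = PySem.Set.ofList (w :: tl) := by
          apply List.filter_eq_self.mpr
          intro u hu
          have hmem : u ∈ (w :: tl) := (PySem.Set.mem_ofList _ _).mp hu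
          have hne : u ≠ v := fun huv => hvnot (huv ▸ hmem)
          simp [hne]
        rw [hd2, List.map_cons, PySem.Set.ofList_cons w tl, List.map_cons]
        have hvne : ∀ u ∈ (w :: tl), v ≠ u := fun u hu hvu => hvnot (hvu ▸ hu)
        rw [List.cons.injEq, List.cons.injEq]
        refine ⟨?_, ?_, ?_⟩
        · rw [List.count_cons_self, List.count_eq_zero_of_not_mem hvnot]
          norm_num
        · rw [List.count_cons_of_ne (hvne w List.mem_cons_self)]
        · apply List.map_congr_left
          intro u hu
          have humem : u ∈ (w :: tl) := by
            have h1 : u ∈ PySem.Set.ofList tl := ((PySem.Set.mem_discard _ _ _).mp hu).1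
            exact List.mem_cons_of_mem w ((PySem.Set.mem_ofList _ _).mp h1)
          rw [List.count_cons_of_ne (hvne u humem)]

-- the bucket-filling loop, elementwise: bucket j collects the runs with count j, in order
lemma pvBucketFold (rs : List (Int × Int)) (B : List (List Int))
    (h : ∀ p ∈ rs, 0 ≤ p.2 ∧ p.2.toNat < B.length) :
    rs.foldl (fun b p => PySem.List.pySetD b p.2 (PySem.List.pyGetD b p.2 [] ++ [p.1, p.2])) B
    = (List.range B.length).map (fun j =>
        B.getD j [] ++ (rs.filter (fun p => decide (p.2 = (j : Int)))).flatMap (fun p => [p.1, p.2])) := by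
  induction rs generalizing B with
  | nil =>
    simp only [List.foldl_nil, List.filter_nil, List.flatMap_nil, List.append_nil]
    have h0 : List.map (fun j => B.getD j []) (List.range B.length) = B := by
      simpa using pvMapIdx B [] (fun x => x)
    exact h0.symm
  | cons p rs ih =>
    obtain ⟨hp0, hplen⟩ := h p List.mem_cons_self
    rw [List.foldl_cons, PySem.List.pyGetD_of_nonneg B [] hp0, PySem.List.pySetD_of_nonneg B _ hp0,
      ih _ (by intro q hq; have := h q (List.mem_cons_of_mem p hq); simpa using this)]
    apply List.ext_getElem (by simp)
    intro j hj1 hj2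
    have hjlen : j < B.length := by simpa using hj2
    simp only [List.getElem_map, List.getElem_range]
    by_cases hje : j = p.2.toNat
    · have hcast : ((j : Int)) = p.2 := by omega
      have hg : (B.set p.2.toNat (B.getD p.2.toNat [] ++ [p.1, p.2])).getD j []
          = B.getD j [] ++ [p.1, p.2] := by
        subst hje
        rw [List.getD_eq_getElem _ [] (by simpa using hjlen), List.getElem_set_self,
          List.getD_eq_getElem B [] hjlen]
      rw [List.filter_cons, if_pos (by simp [hcast]), List.flatMap_cons, hg, List.append_assoc]
    · have hne : ¬ (p.2 = (j : Int)) := by omega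
      have hg : (B.set p.2.toNat (B.getD p.2.toNat [] ++ [p.1, p.2])).getD j []
          = B.getD j [] := by
        rw [List.getD_eq_getElem _ [] (by simpa using hjlen),
          List.getElem_set_ne (by omega), List.getD_eq_getElem B [] hjlen]
      rw [List.filter_cons, if_neg (by simpa using hne), hg]

-- distributing a list of keyed items over distinct buckets is a permutation
lemma pvPartPerm (ks : List Int) (rs : List (Int × Int)) (hN : ks.Nodup)
    (hm : ∀ p ∈ rs, p.2 ∈ ks) :
    (ks.flatMap (fun k => rs.filter (fun p => decide (p.2 = k)))).Perm rs := by
  induction ks generalizing rs with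
  | nil =>
    cases rs with
    | nil => simp
    | cons p t => exact absurd (hm p List.mem_cons_self) (by simp)
  | cons k ks ih =>
    simp only [List.flatMap_cons]
    have hcongr : (ks.flatMap (fun k' => rs.filter (fun p => decide (p.2 = k'))))
        = ks.flatMap (fun k' => (rs.filter (fun p => !decide (p.2 = k))).filter (fun p => decide (p.2 = k'))) := by
      rw [List.flatMap_def, List.flatMap_def]
      congr 1
      apply List.map_congr_left
      intro k' hk'
      have hkk : k' ≠ k := by rintro rfl; exact (List.nodup_cons.mp hN).1 hk'
      rw [List.filter_filter]
      apply List.filter_congr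
      intro p _
      by_cases hp : p.2 = k' <;> simp [hp, hkk]
    rw [hcongr]
    have hperm := ih (rs.filter (fun p => !decide (p.2 = k))) (List.nodup_cons.mp hN).2 (by
      intro p hp
      have h1 := hm p (List.mem_of_mem_filter hp)
      have h2 := List.of_mem_filter hp
      simp only [Bool.not_eq_eq_eq_not, Bool.not_true, decide_eq_false_iff_not] at h2
      rcases List.mem_cons.mp h1 with h | h
      · exact absurd h h2
      · exact h)
    exact (List.Perm.append_left _ hperm).trans
      (List.filter_append_perm (fun p => decide (p.2 = k)) rs)

-- the concatenated buckets are strictly increasing in the (count, value) lexicographic key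
lemma pvPartPairwise (ks : List Int) (rs : List (Int × Int)) (hks : ks.Pairwise (· < ·))
    (hrs : rs.Pairwise (fun p q => p.1 < q.1)) :
    (ks.flatMap (fun k => rs.filter (fun p => decide (p.2 = k)))).Pairwise
      (fun p q => toLex (p.2, p.1) < toLex (q.2, q.1)) := by
  induction ks with
  | nil => simp
  | cons k ks ih =>
    simp only [List.flatMap_cons, List.pairwise_append]
    refine ⟨?_, ih (List.Pairwise.of_cons hks), ?_⟩
    · have hf : (rs.filter (fun p => decide (p.2 = k))).Pairwise (fun p q => p.1 < q.1) :=
        List.Pairwise.filter _ hrs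
      refine List.Pairwise.imp_of_mem ?_ hf
      intro p q hp hq hlt
      have h1 : p.2 = k := by simpa using List.of_mem_filter hp
      have h2 : q.2 = k := by simpa using List.of_mem_filter hq
      rw [Prod.Lex.toLex_lt_toLex]
      exact Or.inr ⟨by rw [h1, h2], hlt⟩
    · intro a ha b hb
      obtain ⟨k', hk', hbmem⟩ := List.mem_flatMap.mp hb
      have hkk : k < k' := (List.pairwise_cons.mp hks).1 k' hk'
      have h1 : a.2 = k := by simpa using List.of_mem_filter ha
      have h2 : b.2 = k' := by simpa using List.of_mem_filter hbmem
      rw [Prod.Lex.toLex_lt_toLex]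
      exact Or.inl (by rw [h1, h2]; exact hkk)

-- one column of B equals one column of A: sort + RLE + counting buckets = Counter + (count, value) sort
lemma pvColFlatEq (A : List (List Int)) (c : Int) :
    ((pvRLE_alt (PySem.List.sorted
        ((A.filter (fun row => decide (PySem.List.pyGetD row c 0 ≠ 0))).map
          (fun row => PySem.List.pyGetD row c 0)) (fun x => x) false)).foldl
      (fun b p => PySem.List.pySetD b p.2 (PySem.List.pyGetD b p.2 [] ++ [p.1, p.2]))
      ((PySem.List.pyRange 0 ((A.length : Int) + 1)).map (fun _ => ([] : List Int)))).flatten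
    = pvCompress (A.map (fun row => PySem.List.pyGetD row c 0)) := by
  -- abbreviations
  set col := A.map (fun row => PySem.List.pyGetD row c 0) with hcol
  have hfm : (A.filter (fun row => decide (PySem.List.pyGetD row c 0 ≠ 0))).map
      (fun row => PySem.List.pyGetD row c 0) = col.filter (fun x => decide (x ≠ 0)) := by
    rw [hcol, List.filter_map]
    rfl
  rw [hfm]
  set nz := col.filter (fun x => decide (x ≠ 0)) with hnz
  set svals := PySem.List.sorted nz (fun x => x) false with hsvals
  set runs := pvRLE_alt svals with hruns
  set n := A.length with hn
  -- the initial buckets are (n+1) empty lists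
  have hB0 : (PySem.List.pyRange 0 ((n : Int) + 1)).map (fun _ => ([] : List Int))
      = List.replicate (n + 1) [] := by
    have : ((n : Int) + 1) = ((n + 1 : Nat) : Int) := by push_cast; ring
    rw [this, pvRange_cast _ (by positivity)]
    simp
  -- facts about runs
  have hsp : svals.Pairwise (· ≤ ·) := PySem.List.sorted_pairwise nz (fun x => x)
  have hrunsEq : runs = (PySem.Set.ofList svals).map (fun u => (u, (svals.count u : Int))) := by
    rw [hruns, pvRLE_alt, pvRunsSpec svals hsp]
  have hsvperm : svals.Perm nz := PySem.List.sorted_perm nz (fun x => x) false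
  have hrange : ∀ p ∈ runs, 1 ≤ p.2 ∧ p.2 ≤ (n : Int) := by
    intro p hp
    rw [hrunsEq] at hp
    obtain ⟨u, hu, rfl⟩ := List.mem_map.mp hp
    have humem : u ∈ svals := (PySem.Set.mem_ofList _ _).mp hu
    have h1 : 0 < svals.count u := List.count_pos_iff.mpr humem
    have h2 : svals.count u ≤ svals.length := List.count_le_length
    have h3 : svals.length = nz.length := hsvperm.length_eq
    have h4 : nz.length ≤ col.length := List.length_filter_le _ _
    have h5 : col.length = n := by rw [hcol, hn, List.length_map]
    constructor <;> simp <;> omega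
  -- run the bucket loop
  rw [hB0, pvBucketFold runs (List.replicate (n + 1) []) (by
    intro p hp
    have := hrange p hp
    constructor
    · omega
    · rw [List.length_replicate]; omega)]
  simp only [List.length_replicate]
  have hmapc : List.map (fun (j : Nat) => (List.replicate (n + 1) ([] : List Int)).getD j []
        ++ List.flatMap (fun p => ([p.1, p.2] : List Int)) (List.filter (fun p => decide (p.2 = (j : Int))) runs))
        (List.range (n + 1))
      = List.map (fun (j : Nat) => List.flatMap (fun p => ([p.1, p.2] : List Int))
          (List.filter (fun p => decide (p.2 = (j : Int))) runs)) (List.range (n + 1)) := by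
    apply List.map_congr_left
    intro j hj
    rw [List.getD_replicate _ (List.mem_range.mp hj), List.nil_append]
  rw [hmapc, ← List.flatMap_def, ← List.flatMap_assoc]
  -- rewrite the Nat range of buckets as an Int key list
  rw [← List.flatMap_map (fun j : Nat => ((j : Int)))
    (fun k => List.filter (fun p => decide (p.2 = k)) runs) (List.range (n + 1))]
  set ks := (List.range (n + 1)).map (fun j : Nat => (j : Int)) with hks
  -- A's side: sorted2 of the counter items is sorted by the lex key
  rw [pvCompress, PySem.List.foldl_append_eq_flatMap, List.nil_append,
    pvSorted2Lex (PySem.Dict.counter nz).items (fun x => x.2) (fun x => x.1)]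
  -- identify the sorted list with the bucket concatenation
  have hksN : ks.Nodup := by
    rw [hks]
    exact (List.nodup_range).map (fun a b => by omega)
  have hkm : ∀ p ∈ runs, p.2 ∈ ks := by
    intro p hp
    have := hrange p hp
    rw [hks]
    refine List.mem_map.mpr ⟨p.2.toNat, List.mem_range.mpr (by omega), by omega⟩
  have hperm1 : (ks.flatMap (fun k => runs.filter (fun p => decide (p.2 = k)))).Perm runs :=
    pvPartPerm ks runs hksN hkm
  have hitems : (PySem.Dict.counter nz).items
      = (PySem.Set.ofList nz).map (fun u => (u, (nz.count u : Int))) := PySem.Dict.items_counter nz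
  have hruns2 : runs = (PySem.Set.ofList svals).map (fun u => (u, (nz.count u : Int))) := by
    rw [hrunsEq]
    apply List.map_congr_left
    intro u _
    rw [hsvperm.count_eq]
  have hofperm : (PySem.Set.ofList svals).Perm (PySem.Set.ofList nz) := by
    rw [List.perm_ext_iff_of_nodup (PySem.Set.nodup_ofList _) (PySem.Set.nodup_ofList _)]
    intro a
    rw [PySem.Set.mem_ofList, PySem.Set.mem_ofList, hsvperm.mem_iff]
  have hpermItems : (ks.flatMap (fun k => runs.filter (fun p => decide (p.2 = k)))).Perm
      (PySem.Dict.counter nz).items := by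
    rw [hitems]
    exact hperm1.trans (hruns2 ▸ hofperm.map _)
  have hofpw : (PySem.Set.ofList svals).Pairwise (· < ·) := by
    have h1 : (PySem.Set.ofList svals).Pairwise (· ≤ ·) :=
      List.Pairwise.sublist (pvOfListSublist svals) hsp
    have h2 : (PySem.Set.ofList svals).Pairwise (· ≠ ·) := PySem.Set.nodup_ofList _
    exact (h1.and h2).imp (fun h => lt_of_le_of_ne h.1 h.2)
  have hrunspw : runs.Pairwise (fun p q => p.1 < q.1) := by
    rw [hrunsEq, List.pairwise_map]
    exact hofpw
  have hpw := pvPartPairwise ks runs (by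
      rw [hks]
      refine List.pairwise_map.mpr ?_
      exact (List.pairwise_lt_range).imp (fun h => by omega)) hrunspw
  rw [PySem.List.sorted_eq_of_perm_of_pairwise_lt (PySem.Dict.counter nz).items
    (ks.flatMap (fun k => runs.filter (fun p => decide (p.2 = k))))
    (fun p => toLex (p.2, p.1)) hpermItems hpw]

lemma pvColsEq2 (A : List (List Int)) :
    (PySem.List.pyRange 0 (A.headI.length : Int)).map
      (fun c => pvCompress (A.map (fun row => PySem.List.pyGetD row c 0))) = pvCols A := by
  rw [pvRange_cast _ (by positivity)]
  rfl

lemma pvMaxEq2 (A : List (List Int)) :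
    (PySem.List.pyRange 0 (A.headI.length : Int)).map
      (fun c => ((pvCompress (A.map (fun row => PySem.List.pyGetD row c 0))).length : Int))
      = (pvCols A).map (fun col => (col.length : Int)) := by
  rw [← pvColsEq2, List.map_map]
  rfl

lemma pvAltEq (A : List (List Int)) : operation_C_alt A = pvCanon A := by
  unfold operation_C_alt
  simp only [pvHeadGetD, PySem.List.len_eq]
  rw [pvFoldB]
  simp only [List.nil_append, pvColFlatEq]
  rw [← List.foldl_map, pvColsEq2, pvMaxEq2, List.foldl_map]
  have hm : min ((pvCols A).foldl (fun m col => max m (col.length : Int)) 0) 100 = pvM A := rfl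
  rw [hm]
  unfold pvCanon
  rw [pvRange_cast _ (pvM_nonneg A)]
  apply List.map_congr_left
  intro j _
  apply List.map_congr_left
  intro col _
  simp [PySem.List.pyGetD_natCast, List.getD]

lemma pvCopy (P : List (List Int)) (m : Int) (hm : 0 ≤ m)
    (hlen : ∀ row ∈ P, row.length = m.toNat) :
    (PySem.List.pyRange 0 (P.length : Int)).map (fun r =>
      (PySem.List.pyRange 0 m).map (fun c => PySem.List.pyGetD (PySem.List.pyGetD P r []) c 0)) = P := by
  rw [pvRange_cast _ (by positivity)]
  simp only [PySem.List.pyGetD_natCast, Int.toNat_natCast]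
  rw [pvMapIdx P [] (fun row => (PySem.List.pyRange 0 m).map (fun c => PySem.List.pyGetD row c 0))]
  have hrow : ∀ row ∈ P, (PySem.List.pyRange 0 m).map (fun c => PySem.List.pyGetD row c 0) = row := by
    intro row hr
    have h1 : m = PySem.List.len row := by
      rw [PySem.List.len_eq]
      have := hlen row hr
      omega
    rw [h1]
    exact PySem.List.map_pyGetD_pyRange_zero row 0
  rw [List.map_congr_left hrow, List.map_id']

lemma pvAEq (A : List (List Int)) (hp : Pre_operation_C A) : operation_C A = pvCanon A := by
  obtain ⟨hne, hh, hrows⟩ := hp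
  unfold operation_C operation_R_port
  simp only [pvHeadGetD, PySem.List.len_eq, pvInner]
  rw [List.foldl_map, pvFoldA]
  simp only [List.nil_append]
  rw [← List.foldl_map, pvColsEq, pvMaxEq, List.foldl_map]
  have hm0 : min ((pvCols A).foldl (fun m col => max m (col.length : Int)) 0) 100 = pvM A := rfl
  rw [hm0]
  have hpadf : (fun row : List Int => if (row.length : Int) < pvM A then row ++ PySem.List.pyRepeat [0] (pvM A - (row.length : Int)) else PySem.List.slice row none (some (pvM A))) = pvPad (pvM A) := rfl
  rw [hpadf]
  have hPcols_ne : pvCols A ≠ [] := by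
    unfold pvCols
    simp only [ne_eq, List.map_eq_nil_iff, List.range_eq_nil]
    exact fun h => hh (List.length_eq_zero_iff.mp h ▸ rfl)
  have hhead : (((pvCols A).map (pvPad (pvM A))).headI.length : Int) = pvM A := by
    obtain ⟨c0, cs0, hP⟩ := List.exists_cons_of_ne_nil hPcols_ne
    rw [hP]
    simp only [List.map_cons, List.headI_cons]
    rw [pvPadLen _ (pvM_nonneg A)]
    have := pvM_nonneg A
    omega
  rw [hhead]
  rw [pvCopy _ (pvM A) (pvM_nonneg A)
    (by intro row hr
        obtain ⟨col, _, rfl⟩ := List.mem_map.mp hr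
        exact pvPadLen _ (pvM_nonneg A) col)]
  simp only [pvInner]
  rw [pvRange_cast _ (pvM_nonneg A)]
  unfold pvCanon
  apply List.map_congr_left
  intro j hj
  rw [List.map_map]
  apply List.map_congr_left
  intro col _
  simp only [Function.comp]
  exact pvPadGet (pvM A) (pvM_nonneg A) col j (by simpa using hj)

-- ===== VERDICT (by name: the statement is the Claim_ definition above) =====
theorem operation_C_spec : Claim_equal_operation_C := by
  intro A _ hp
  unfold Spec_operation_C
  rw [pvAltEq, pvAEq A hp]
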